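-- pv_equiv track=rewrite | github.com/hwef/OnmyojiAutoScript | module/logger.py | get_time_period
-- ===== SOURCE A (Python) =====
-- def get_time_period(hour: int) -> str:
--     """智能匹配中文时间段（支持自定义规则）"""
--     periods = [
--         (0, "凌晨"),
--         (6, "早晨"),
--         (9, "上午"),
--         (12, "中午"),
--         (13, "下午"),
--         (18, "傍晚"),
--         (20, "晚上")
--     ]
--     # 逆序匹配第一个符合条件的时间段
--     return next((name for threshold, name in reversed(periods) if hour >= threshold), "凌晨")
-- ===== SOURCE B (Python) =====
-- import bisect
--
-- _THRESHOLDS = [0, 6, 9, 12, 13, 18, 20]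
-- _NAMES = ["凌晨", "早晨", "上午", "中午", "下午", "傍晚", "晚上"]
--
--
-- def get_time_period(hour: int) -> str:
--     """智能匹配中文时间段（查表 + 二分查找）"""
--     idx = bisect.bisect_right(_THRESHOLDS, hour) - 1
--     return _NAMES[max(0, idx)]
-- ===== Notes on version B (the rewrite author's own statement) =====
-- stated objective: idiomatic
-- what changed: Replaced the reverse linear scan over (threshold, name) pairs with a precomputed threshold table indexed by bisect.bisect_right (binary search), with the index clamped so hours below the first threshold get the first name.
import Mathlib
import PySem

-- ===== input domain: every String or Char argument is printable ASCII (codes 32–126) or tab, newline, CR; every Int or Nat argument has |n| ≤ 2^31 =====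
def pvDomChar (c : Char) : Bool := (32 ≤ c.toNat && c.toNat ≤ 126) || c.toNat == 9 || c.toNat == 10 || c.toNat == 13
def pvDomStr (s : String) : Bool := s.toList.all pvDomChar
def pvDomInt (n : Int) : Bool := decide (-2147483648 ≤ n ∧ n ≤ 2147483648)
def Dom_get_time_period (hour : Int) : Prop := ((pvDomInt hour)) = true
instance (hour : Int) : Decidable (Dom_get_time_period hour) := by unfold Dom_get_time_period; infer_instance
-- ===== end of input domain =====

-- B replaces A's reverse linear scan over (threshold, name) pairs by a binary search
-- (bisect_right) into a precomputed threshold table; objective: idiomatic.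

-- ===== PORT A =====
def get_time_period (hour : Int) : String :=
  let periods : List (Int × String) :=
    [(0, "凌晨"), (6, "早晨"), (9, "上午"), (12, "中午"),
     (13, "下午"), (18, "傍晚"), (20, "晚上")]
  -- next((name for threshold, name in reversed(periods) if hour >= threshold), "凌晨")
  (((periods.reverse).find? (fun p => decide (hour ≥ p.1))).map Prod.snd).getD "凌晨"

-- ===== PORT B =====
def pvThresholds : List Int := [0, 6, 9, 12, 13, 18, 20]
def pvNames : List String := ["凌晨", "早晨", "上午", "中午", "下午", "傍晚", "晚上"]

-- bisect.bisect_right(a, x) on lo..hi, transliterated (loop on hi - lo)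
def pvBisectRight (a : List Int) (x : Int) (lo hi : Nat) : Nat :=
  if _h : lo < hi then
    let mid := (lo + hi) / 2
    if x < a.getD mid 0 then pvBisectRight a x lo mid
    else pvBisectRight a x (mid + 1) hi
  else lo
termination_by hi - lo
decreasing_by all_goals omega

def get_time_period_alt (hour : Int) : String :=
  let idx : Int := (pvBisectRight pvThresholds hour 0 pvThresholds.length : Int) - 1
  pvNames.getD (max 0 idx).toNat "凌晨"

-- ===== PRECONDITION & SPEC =====
def Spec_get_time_period (hour : Int) (out : String) : Prop := out = get_time_period_alt hour
instance (hour : Int) (out : String) : Decidable (Spec_get_time_period hour out) := by unfold Spec_get_time_period; infer_instance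

-- ===== CLAIM (what is proved, stated in full; the proofs are below) =====
def Claim_equal_get_time_period : Prop := ∀ (hour : Int), Dom_get_time_period hour → Spec_get_time_period hour (get_time_period hour)

-- ===== LEMMAS AND PROOFS =====

-- ===== VERDICT (by name: the statement is the Claim_ definition above) =====
theorem get_time_period_spec : Claim_equal_get_time_period := by
  intro hour _
  unfold Spec_get_time_period get_time_period get_time_period_alt
  by_cases h0 : hour < 0 <;> by_cases h6 : hour < 6 <;> by_cases h9 : hour < 9 <;>
    by_cases h12 : hour < 12 <;> by_cases h13 : hour < 13 <;>
    by_cases h18 : hour < 18 <;> by_cases h20 : hour < 20 <;>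
  first
  | omega
  | simp [pvBisectRight, pvThresholds, pvNames, List.find?,
      (show ¬ (0:Int) ≤ hour by omega),
      (show hour < (0:Int) by omega),
      (show ¬ (6:Int) ≤ hour by omega),
      (show hour < (6:Int) by omega),
      (show ¬ (9:Int) ≤ hour by omega),
      (show hour < (9:Int) by omega),
      (show ¬ (12:Int) ≤ hour by omega),
      (show hour < (12:Int) by omega),
      (show ¬ (13:Int) ≤ hour by omega),
      (show hour < (13:Int) by omega),
      (show ¬ (18:Int) ≤ hour by omega),
      (show hour < (18:Int) by omega),
      (show ¬ (20:Int) ≤ hour by omega),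
      (show hour < (20:Int) by omega)]
  | simp [pvBisectRight, pvThresholds, pvNames, List.find?,
      (show (0:Int) ≤ hour by omega),
      (show ¬ hour < (0:Int) by omega),
      (show ¬ (6:Int) ≤ hour by omega),
      (show hour < (6:Int) by omega),
      (show ¬ (9:Int) ≤ hour by omega),
      (show hour < (9:Int) by omega),
      (show ¬ (12:Int) ≤ hour by omega),
      (show hour < (12:Int) by omega),
      (show ¬ (13:Int) ≤ hour by omega),
      (show hour < (13:Int) by omega),
      (show ¬ (18:Int) ≤ hour by omega),
      (show hour < (18:Int) by omega),
      (show ¬ (20:Int) ≤ hour by omega),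
      (show hour < (20:Int) by omega)]
  | simp [pvBisectRight, pvThresholds, pvNames, List.find?,
      (show (0:Int) ≤ hour by omega),
      (show ¬ hour < (0:Int) by omega),
      (show (6:Int) ≤ hour by omega),
      (show ¬ hour < (6:Int) by omega),
      (show ¬ (9:Int) ≤ hour by omega),
      (show hour < (9:Int) by omega),
      (show ¬ (12:Int) ≤ hour by omega),
      (show hour < (12:Int) by omega),
      (show ¬ (13:Int) ≤ hour by omega),
      (show hour < (13:Int) by omega),
      (show ¬ (18:Int) ≤ hour by omega),
      (show hour < (18:Int) by omega),
      (show ¬ (20:Int) ≤ hour by omega),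
      (show hour < (20:Int) by omega)]
  | simp [pvBisectRight, pvThresholds, pvNames, List.find?,
      (show (0:Int) ≤ hour by omega),
      (show ¬ hour < (0:Int) by omega),
      (show (6:Int) ≤ hour by omega),
      (show ¬ hour < (6:Int) by omega),
      (show (9:Int) ≤ hour by omega),
      (show ¬ hour < (9:Int) by omega),
      (show ¬ (12:Int) ≤ hour by omega),
      (show hour < (12:Int) by omega),
      (show ¬ (13:Int) ≤ hour by omega),
      (show hour < (13:Int) by omega),
      (show ¬ (18:Int) ≤ hour by omega),
      (show hour < (18:Int) by omega),
      (show ¬ (20:Int) ≤ hour by omega),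
      (show hour < (20:Int) by omega)]
  | simp [pvBisectRight, pvThresholds, pvNames, List.find?,
      (show (0:Int) ≤ hour by omega),
      (show ¬ hour < (0:Int) by omega),
      (show (6:Int) ≤ hour by omega),
      (show ¬ hour < (6:Int) by omega),
      (show (9:Int) ≤ hour by omega),
      (show ¬ hour < (9:Int) by omega),
      (show (12:Int) ≤ hour by omega),
      (show ¬ hour < (12:Int) by omega),
      (show ¬ (13:Int) ≤ hour by omega),
      (show hour < (13:Int) by omega),
      (show ¬ (18:Int) ≤ hour by omega),
      (show hour < (18:Int) by omega),
      (show ¬ (20:Int) ≤ hour by omega),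
      (show hour < (20:Int) by omega)]
  | simp [pvBisectRight, pvThresholds, pvNames, List.find?,
      (show (0:Int) ≤ hour by omega),
      (show ¬ hour < (0:Int) by omega),
      (show (6:Int) ≤ hour by omega),
      (show ¬ hour < (6:Int) by omega),
      (show (9:Int) ≤ hour by omega),
      (show ¬ hour < (9:Int) by omega),
      (show (12:Int) ≤ hour by omega),
      (show ¬ hour < (12:Int) by omega),
      (show (13:Int) ≤ hour by omega),
      (show ¬ hour < (13:Int) by omega),
      (show ¬ (18:Int) ≤ hour by omega),
      (show hour < (18:Int) by omega),
      (show ¬ (20:Int) ≤ hour by omega),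
      (show hour < (20:Int) by omega)]
  | simp [pvBisectRight, pvThresholds, pvNames, List.find?,
      (show (0:Int) ≤ hour by omega),
      (show ¬ hour < (0:Int) by omega),
      (show (6:Int) ≤ hour by omega),
      (show ¬ hour < (6:Int) by omega),
      (show (9:Int) ≤ hour by omega),
      (show ¬ hour < (9:Int) by omega),
      (show (12:Int) ≤ hour by omega),
      (show ¬ hour < (12:Int) by omega),
      (show (13:Int) ≤ hour by omega),
      (show ¬ hour < (13:Int) by omega),
      (show (18:Int) ≤ hour by omega),
      (show ¬ hour < (18:Int) by omega),
      (show ¬ (20:Int) ≤ hour by omega),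
      (show hour < (20:Int) by omega)]
  | simp [pvBisectRight, pvThresholds, pvNames, List.find?,
      (show (0:Int) ≤ hour by omega),
      (show ¬ hour < (0:Int) by omega),
      (show (6:Int) ≤ hour by omega),
      (show ¬ hour < (6:Int) by omega),
      (show (9:Int) ≤ hour by omega),
      (show ¬ hour < (9:Int) by omega),
      (show (12:Int) ≤ hour by omega),
      (show ¬ hour < (12:Int) by omega),
      (show (13:Int) ≤ hour by omega),
      (show ¬ hour < (13:Int) by omega),
      (show (18:Int) ≤ hour by omega),
      (show ¬ hour < (18:Int) by omega),
      (show (20:Int) ≤ hour by omega),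
      (show ¬ hour < (20:Int) by omega)]
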